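-- pv_equiv track=rewrite | github.com/morantaDev/DEV_DATA_P5_Mor_Anta_SENE | 002 Python/Algo_Python/exercice7.py | transformer_en_miniscule
-- ===== SOURCE A (Python) =====
-- def transformer_en_miniscule(string):
--     Maj=['A','B','C','D','E','F','G','H','I','J','K','L','M','N','O','P','Q','R','S','T','U','V','W','X','Y','Z']
--     tmp=0
--     for i in range(len(string)):
--         if string[i] in Maj:
--             tmp=ord(string[i])
--             tmp=tmp+32
--             tmp=chr(tmp)
--             string = string[:i] + tmp + string[i+1:]
--     return string
-- ===== SOURCE B (Python) =====
-- def transformer_en_miniscule(string):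
--     table = {c: c + 32 for c in range(65, 91)}
--     return string.translate(table)
-- ===== Notes on version B (the rewrite author's own statement) =====
-- stated objective: faster
-- what changed: B builds a codepoint translation table once and does a single str.translate pass instead of A's per-index membership test against a 26-element list plus full-string slice-and-concatenate rebuild for every uppercase letter.
import Mathlib
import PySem

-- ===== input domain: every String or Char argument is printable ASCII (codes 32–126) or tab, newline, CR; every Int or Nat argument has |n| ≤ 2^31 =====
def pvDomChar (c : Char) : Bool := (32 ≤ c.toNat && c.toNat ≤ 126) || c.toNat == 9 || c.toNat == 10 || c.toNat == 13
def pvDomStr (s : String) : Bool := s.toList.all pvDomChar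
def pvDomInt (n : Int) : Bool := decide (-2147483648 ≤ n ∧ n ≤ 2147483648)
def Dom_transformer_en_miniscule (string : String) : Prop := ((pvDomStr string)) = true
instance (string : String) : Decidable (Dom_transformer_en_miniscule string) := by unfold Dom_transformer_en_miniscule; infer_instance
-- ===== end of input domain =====

-- B builds a codepoint translation table once and translates in a single pass, instead of
-- A's per-index membership test plus slice-and-concatenate string rebuild (return value only).

-- ===== PORT A =====
def pvMaj : List Char :=
  ['A','B','C','D','E','F','G','H','I','J','K','L','M',
   'N','O','P','Q','R','S','T','U','V','W','X','Y','Z']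

-- one body of A's loop; i < length always, so getD is exact for string[i];
-- string[:i] / string[i+1:] with 0 ≤ i are exactly take/drop; ord/chr are toNat/ofNat (valid codepoints here)
def pvStepA (cs : List Char) (i : Nat) : List Char :=
  if cs.getD i 'A' ∈ pvMaj then
    cs.take i ++ [Char.ofNat ((cs.getD i 'A').toNat + 32)] ++ cs.drop (i + 1)
  else cs

def transformer_en_miniscule (string : String) : String :=
  String.mk ((List.range string.toList.length).foldl pvStepA string.toList)

-- ===== PORT B =====
-- table = {c: c + 32 for c in range(65, 91)}
def pvTableB : PySem.Dict Int Int :=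
  (PySem.List.pyRange 65 91 1).foldl (fun d c => d.insert c (c + 32)) PySem.Dict.empty

-- string.translate(table): each char is looked up by codepoint; hit → mapped char, miss → unchanged
def transformer_en_miniscule_alt (string : String) : String :=
  String.mk (string.toList.map (fun c =>
    match pvTableB.get? (c.toNat : Int) with
    | some v => Char.ofNat v.toNat
    | none => c))

-- ===== PRECONDITION & SPEC =====
def Spec_transformer_en_miniscule (string : String) (out : String) : Prop := out = transformer_en_miniscule_alt string
instance (string : String) (out : String) : Decidable (Spec_transformer_en_miniscule string out) := by unfold Spec_transformer_en_miniscule; infer_instance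

-- ===== CLAIM (what is proved, stated in full; the proofs are below) =====
def Claim_equal_transformer_en_miniscule : Prop := ∀ (string : String), Dom_transformer_en_miniscule string → Spec_transformer_en_miniscule string (transformer_en_miniscule string)

-- ===== LEMMAS AND PROOFS =====

def pvFA (c : Char) : Char :=
  if c ∈ pvMaj then Char.ofNat (c.toNat + 32) else c

def pvFB (c : Char) : Char :=
  match pvTableB.get? (c.toNat : Int) with
  | some v => Char.ofNat v.toNat
  | none => c

-- A's loop, started on ys ++ tail over ys's indices, maps pvFA over ys and leaves tail alone
lemma pvFoldA (ys tail : List Char) :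
    (List.range ys.length).foldl pvStepA (ys ++ tail) = ys.map pvFA ++ tail := by
  induction ys using List.reverseRecOn generalizing tail with
  | nil => simp
  | append_singleton ys x ih =>
    rw [List.length_append, List.length_singleton, List.range_succ, List.foldl_append,
        List.append_assoc ys [x] tail, ih ([x] ++ tail)]
    simp only [List.foldl_cons, List.foldl_nil]
    unfold pvStepA
    have hlen : (ys.map pvFA).length = ys.length := by simp
    have hget : (ys.map pvFA ++ ([x] ++ tail)).getD ys.length 'A' = x := by
      rw [List.getD_eq_getElem?_getD, List.getElem?_append_right (by omega)]
      simp [hlen]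
    have htake : (ys.map pvFA ++ ([x] ++ tail)).take ys.length = ys.map pvFA := by
      rw [← hlen, List.take_left]
    have hdrop : (ys.map pvFA ++ ([x] ++ tail)).drop (ys.length + 1) = tail := by
      have : ys.length + 1 = (ys.map pvFA).length + 1 := by omega
      rw [this, List.drop_append]
      simp
    rw [hget, htake, hdrop]
    by_cases hx : x ∈ pvMaj
    · simp [hx, pvFA, List.map_append]
    · simp [hx, pvFA, List.map_append]

-- the two per-character functions agree on every code point the domain admits
set_option maxRecDepth 4096 in
lemma pvPoint : ∀ k : Nat, k < 128 → pvFA (Char.ofNat k) = pvFB (Char.ofNat k) := by decide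

lemma pvPoint' (c : Char) (hc : pvDomChar c = true) : pvFA c = pvFB c := by
  have hk : c.toNat < 128 := by
    simp only [pvDomChar, Bool.or_eq_true, Bool.and_eq_true, decide_eq_true_eq, beq_iff_eq] at hc
    omega
  have := pvPoint c.toNat hk
  rwa [Char.ofNat_toNat] at this

-- ===== VERDICT (by name: the statement is the Claim_ definition above) =====
theorem transformer_en_miniscule_spec : Claim_equal_transformer_en_miniscule := by
  intro s hdom
  unfold Spec_transformer_en_miniscule transformer_en_miniscule transformer_en_miniscule_alt
  have h := pvFoldA s.toList []
  simp only [List.append_nil] at h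
  rw [h]
  congr 1
  apply List.map_congr_left
  intro c hc
  have hd : pvDomChar c = true := by
    unfold Dom_transformer_en_miniscule pvDomStr at hdom
    exact List.all_eq_true.mp hdom c hc
  have := pvPoint' c hd
  simpa [pvFA, pvFB] using this
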